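-- pv_equiv track=rewrite | github.com/webcloudstudio/Specifications | bin/project_manager.py | get_applicable_rules
-- ===== SOURCE A (Python) =====
-- STATUS_ORDER = ["IDEA", "PROTOTYPE", "ACTIVE", "PRODUCTION", "ARCHIVED"]
--
-- RULES_BY_LEVEL = {
--     "IDEA": [
--         "has_metadata",
--         "metadata_has_name",
--         "metadata_has_status",
--         "metadata_status_valid",
--     ],
--     "PROTOTYPE": [
--         "metadata_has_title",
--         "metadata_has_description",
--         "has_claude_md",
--         "claude_md_has_dev_commands",
--         "has_root_index_html",
--     ],
--     "ACTIVE": [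
--         "metadata_has_port",
--         "metadata_has_stack",
--         "stack_components_have_files",
--         "metadata_has_tags",
--         "has_bin_dir",
--         "has_start_script",
--         "has_test_script",
--         "start_script_has_commandcenter_header",
--         "scripts_have_preamble",
--         "scripts_emit_status",
--         "scripts_have_logging",
--         "claude_md_has_endpoints",
--         "claude_md_has_bookmarks",
--     ],
--     "PRODUCTION": [
--         "has_env_example_or_no_env_needed",
--         "health_endpoint_declared",
--         "git_initialized",
--         "git_has_remote",
--         "git_not_dirty",
--         "no_env_committed",
--         "start_script_has_sigterm_trap",
--     ],
-- }
--
-- ARCHIVED_RULES = ["has_metadata", "metadata_has_name", "metadata_has_status", "metadata_status_valid"]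
--
-- def get_applicable_rules(status: str) -> list:
--     if status == "ARCHIVED":
--         return ARCHIVED_RULES
--     rules = []
--     for level in STATUS_ORDER:
--         if level == "ARCHIVED":
--             continue
--         rules.extend(RULES_BY_LEVEL.get(level, []))
--         if level == status:
--             break
--     return rules
-- ===== SOURCE B (Python) =====
-- STATUS_ORDER = ["IDEA", "PROTOTYPE", "ACTIVE", "PRODUCTION", "ARCHIVED"]
--
-- RULES_BY_LEVEL = {
--     "IDEA": [
--         "has_metadata",
--         "metadata_has_name",
--         "metadata_has_status",
--         "metadata_status_valid",
--     ],
--     "PROTOTYPE": [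
--         "metadata_has_title",
--         "metadata_has_description",
--         "has_claude_md",
--         "claude_md_has_dev_commands",
--         "has_root_index_html",
--     ],
--     "ACTIVE": [
--         "metadata_has_port",
--         "metadata_has_stack",
--         "stack_components_have_files",
--         "metadata_has_tags",
--         "has_bin_dir",
--         "has_start_script",
--         "has_test_script",
--         "start_script_has_commandcenter_header",
--         "scripts_have_preamble",
--         "scripts_emit_status",
--         "scripts_have_logging",
--         "claude_md_has_endpoints",
--         "claude_md_has_bookmarks",
--     ],
--     "PRODUCTION": [
--         "has_env_example_or_no_env_needed",
--         "health_endpoint_declared",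
--         "git_initialized",
--         "git_has_remote",
--         "git_not_dirty",
--         "no_env_committed",
--         "start_script_has_sigterm_trap",
--     ],
-- }
--
-- ARCHIVED_RULES = ["has_metadata", "metadata_has_name", "metadata_has_status", "metadata_status_valid"]
--
-- # Built once at import: cumulative rule list per status level (ARCHIVED excluded).
-- _CUMULATIVE = {}
-- _acc = []
-- for _level in STATUS_ORDER:
--     if _level == "ARCHIVED":
--         continue
--     _acc = _acc + RULES_BY_LEVEL.get(_level, [])
--     _CUMULATIVE[_level] = _acc
-- _FULL = _acc
--
-- def get_applicable_rules(status: str) -> list: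
--     if status == "ARCHIVED":
--         return ARCHIVED_RULES
--     return list(_CUMULATIVE.get(status, _FULL))
-- ===== Notes on version B (the rewrite author's own statement) =====
-- stated objective: idiomatic
-- what changed: Replaces the per-call scan-accumulate-break over STATUS_ORDER with a cumulative lookup table built once at module load; each call is a single dict lookup (falling back to the full list) returning a fresh copy.
import Mathlib
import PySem

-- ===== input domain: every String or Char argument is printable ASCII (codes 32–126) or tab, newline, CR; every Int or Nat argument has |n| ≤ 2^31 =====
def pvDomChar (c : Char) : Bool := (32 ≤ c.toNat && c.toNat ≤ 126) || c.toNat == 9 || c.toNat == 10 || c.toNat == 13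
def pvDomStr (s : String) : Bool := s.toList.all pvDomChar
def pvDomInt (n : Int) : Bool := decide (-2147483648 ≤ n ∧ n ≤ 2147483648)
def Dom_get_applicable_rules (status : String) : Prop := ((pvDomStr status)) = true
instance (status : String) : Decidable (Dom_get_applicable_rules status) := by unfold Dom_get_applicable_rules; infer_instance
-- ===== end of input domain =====

-- B replaces A's per-call scan-and-break over STATUS_ORDER by a cumulative table built once,
-- plus a single lookup with the full list as fallback (idiomatic; return value only).

-- ===== PORT A =====
def STATUS_ORDER : List String := ["IDEA", "PROTOTYPE", "ACTIVE", "PRODUCTION", "ARCHIVED"]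

def RULES_BY_LEVEL : PySem.Dict String (List String) := PySem.Dict.ofList
  [ ("IDEA", ["has_metadata", "metadata_has_name", "metadata_has_status", "metadata_status_valid"]),
    ("PROTOTYPE", ["metadata_has_title", "metadata_has_description", "has_claude_md",
      "claude_md_has_dev_commands", "has_root_index_html"]),
    ("ACTIVE", ["metadata_has_port", "metadata_has_stack", "stack_components_have_files",
      "metadata_has_tags", "has_bin_dir", "has_start_script", "has_test_script",
      "start_script_has_commandcenter_header", "scripts_have_preamble", "scripts_emit_status",
      "scripts_have_logging", "claude_md_has_endpoints", "claude_md_has_bookmarks"]),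
    ("PRODUCTION", ["has_env_example_or_no_env_needed", "health_endpoint_declared",
      "git_initialized", "git_has_remote", "git_not_dirty", "no_env_committed",
      "start_script_has_sigterm_trap"]) ]

def ARCHIVED_RULES : List String :=
  ["has_metadata", "metadata_has_name", "metadata_has_status", "metadata_status_valid"]

-- A's for-loop with 'continue'/'break', as structural recursion over the levels
def loopA (status : String) : List String → List String → List String
  | [], rules => rules
  | level :: rest, rules =>
    if level == "ARCHIVED" then loopA status rest rules
    else
      let rules' := rules ++ RULES_BY_LEVEL.getD level []
      if level == status then rules' else loopA status rest rules'

def get_applicable_rules (status : String) : List String :=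
  if status == "ARCHIVED" then ARCHIVED_RULES
  else loopA status STATUS_ORDER []

-- ===== PORT B =====
-- module-load build loop: cumulative table and full list
def buildB : List String → List String → PySem.Dict String (List String) →
    PySem.Dict String (List String) × List String
  | [], acc, tbl => (tbl, acc)
  | level :: rest, acc, tbl =>
    if level == "ARCHIVED" then buildB rest acc tbl
    else
      let acc' := acc ++ RULES_BY_LEVEL.getD level []
      buildB rest acc' (tbl.insert level acc')

def CUMULATIVE : PySem.Dict String (List String) := (buildB STATUS_ORDER [] PySem.Dict.empty).1
def FULL : List String := (buildB STATUS_ORDER [] PySem.Dict.empty).2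

def get_applicable_rules_alt (status : String) : List String :=
  if status == "ARCHIVED" then ARCHIVED_RULES
  else CUMULATIVE.getD status FULL

-- ===== PRECONDITION & SPEC =====
def Spec_get_applicable_rules (status : String) (out : List String) : Prop := out = get_applicable_rules_alt status
instance (status : String) (out : List String) : Decidable (Spec_get_applicable_rules status out) := by unfold Spec_get_applicable_rules; infer_instance

-- ===== CLAIM (what is proved, stated in full; the proofs are below) =====
def Claim_equal_get_applicable_rules : Prop := ∀ (status : String), Dom_get_applicable_rules status → Spec_get_applicable_rules status (get_applicable_rules status)

-- ===== LEMMAS AND PROOFS =====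
theorem eq_cases (status : String) :
    status = "IDEA" ∨ status = "PROTOTYPE" ∨ status = "ACTIVE" ∨ status = "PRODUCTION" ∨
    status = "ARCHIVED" ∨
    (status ≠ "IDEA" ∧ status ≠ "PROTOTYPE" ∧ status ≠ "ACTIVE" ∧ status ≠ "PRODUCTION" ∧
     status ≠ "ARCHIVED") := by
  by_cases h1 : status = "IDEA" <;> by_cases h2 : status = "PROTOTYPE" <;>
    by_cases h3 : status = "ACTIVE" <;> by_cases h4 : status = "PRODUCTION" <;>
    by_cases h5 : status = "ARCHIVED" <;> simp_all

-- ===== VERDICT (by name: the statement is the Claim_ definition above) =====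
theorem get_applicable_rules_spec : Claim_equal_get_applicable_rules := by
  intro status _
  unfold Spec_get_applicable_rules
  rcases eq_cases status with h|h|h|h|h|⟨h1,h2,h3,h4,h5⟩
  · subst h; decide
  · subst h; decide
  · subst h; decide
  · subst h; decide
  · subst h; decide
  · simp [get_applicable_rules, get_applicable_rules_alt, loopA, CUMULATIVE, FULL, buildB,
      STATUS_ORDER, h1, h2, h3, h5, Ne.symm h1, Ne.symm h2, Ne.symm h3, Ne.symm h4,
      PySem.Dict.getD_insert, PySem.Dict.getD_empty]
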